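-- pv_equiv track=rewrite | github.com/andreykutsenko/python-selenium-automation | hw_alg_6/hw_alg_6_4.py | max_in_min_elem_columns_matrix_without_col
-- ===== SOURCE A (Python) =====
-- def max_in_min_elem_columns_matrix_without_col(matrix):
--     min_column = []
--     for i in range(len(matrix[0])):
--         result = []
--         for j in range(len(matrix)):
--             result.append(matrix[j][i])
--         min_column.append(min(result))
--     return f'Max element is {max(min_column)}'
-- ===== SOURCE B (Python) =====
-- def max_in_min_elem_columns_matrix_without_col(matrix):
--     # Row-major single pass: running per-column minimum accumulator.
--     mins = list(matrix[0])
--     for row in matrix[1:]: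
--         mins = [m if m <= x else x for m, x in zip(mins, row)]
--     return f'Max element is {max(mins)}'
-- ===== Notes on version B (the rewrite author's own statement) =====
-- stated objective: alternative
-- what changed: Replaces A's column-major gathering (for each column index an inner loop collecting the whole column into a fresh list, then min of it) with a single row-major pass maintaining a running per-column-minimum accumulator updated by zip, so no per-column list is ever built.
import Mathlib
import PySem

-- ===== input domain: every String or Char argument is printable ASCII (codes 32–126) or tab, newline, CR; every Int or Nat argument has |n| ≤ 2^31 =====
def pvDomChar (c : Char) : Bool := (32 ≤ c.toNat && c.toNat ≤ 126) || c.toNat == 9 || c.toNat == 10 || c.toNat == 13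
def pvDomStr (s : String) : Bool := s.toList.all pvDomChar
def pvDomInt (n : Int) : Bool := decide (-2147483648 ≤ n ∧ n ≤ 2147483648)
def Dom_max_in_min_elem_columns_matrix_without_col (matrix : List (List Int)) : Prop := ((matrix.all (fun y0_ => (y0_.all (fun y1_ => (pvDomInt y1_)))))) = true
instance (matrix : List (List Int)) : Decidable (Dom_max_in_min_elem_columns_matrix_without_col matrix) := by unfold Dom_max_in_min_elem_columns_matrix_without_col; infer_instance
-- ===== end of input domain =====

-- B replaces A's column-major gathering with a single row-major pass keeping a running
-- per-column-minimum accumulator (alternative decomposition: no per-column list is ever built).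


-- ===== PORT A =====
-- literal port of A: for each column index i, gather the column into `result`, take min,
-- then max over the per-column minimums (pyGetD is safe under Pre_ below).
def max_in_min_elem_columns_matrix_without_col (matrix : List (List Int)) : String :=
  let min_column :=
    (PySem.List.pyRange 0 ((PySem.List.pyGetD matrix 0 []).length : Int) 1).foldl
      (fun mc i =>
        let result :=
          (PySem.List.pyRange 0 (matrix.length : Int) 1).foldl
            (fun r j => r ++ [PySem.List.pyGetD (PySem.List.pyGetD matrix j []) i 0]) []
        mc ++ [(PySem.List.min? result (fun y => y)).getD 0]) []
  "Max element is " ++ PySem.Int.toStr ((PySem.List.max? min_column (fun y => y)).getD 0)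

-- ===== PORT B =====
-- literal port of Source B: mins = list(matrix[0]); one pass over matrix[1:] updating mins by zip.
def max_in_min_elem_columns_matrix_without_col_alt (matrix : List (List Int)) : String :=
  let mins0 := PySem.List.pyGetD matrix 0 []
  let mins :=
    (PySem.List.slice matrix (some 1) none).foldl
      (fun mins row => (mins.zip row).map (fun p => if p.1 ≤ p.2 then p.1 else p.2)) mins0
  "Max element is " ++ PySem.Int.toStr ((PySem.List.max? mins (fun y => y)).getD 0)

-- ===== PRECONDITION & SPEC =====
-- Pre_ excludes exactly the inputs where A raises: an empty matrix or empty first row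
-- (IndexError / ValueError) and matrices with a row shorter than the first row (IndexError).
def Pre_max_in_min_elem_columns_matrix_without_col (matrix : List (List Int)) : Prop :=
  matrix ≠ [] ∧ matrix.headI ≠ [] ∧ ∀ row ∈ matrix, matrix.headI.length ≤ row.length
instance (matrix : List (List Int)) : Decidable (Pre_max_in_min_elem_columns_matrix_without_col matrix) := by unfold Pre_max_in_min_elem_columns_matrix_without_col; infer_instance

def pvWitness_max_in_min_elem_columns_matrix_without_col : List (List Int) := [[1, 2], [0, 5]]

def Spec_max_in_min_elem_columns_matrix_without_col (matrix : List (List Int)) (out : String) : Prop := out = max_in_min_elem_columns_matrix_without_col_alt matrix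
instance (matrix : List (List Int)) (out : String) : Decidable (Spec_max_in_min_elem_columns_matrix_without_col matrix out) := by unfold Spec_max_in_min_elem_columns_matrix_without_col; infer_instance

-- ===== CLAIM (what is proved, stated in full; the proofs are below) =====
def Claim_equal_max_in_min_elem_columns_matrix_without_col : Prop := ∀ (matrix : List (List Int)), Dom_max_in_min_elem_columns_matrix_without_col matrix → Pre_max_in_min_elem_columns_matrix_without_col matrix → Spec_max_in_min_elem_columns_matrix_without_col matrix (max_in_min_elem_columns_matrix_without_col matrix)
-- ===== LEMMAS AND PROOFS =====

-- a list is the range-indexed map of its own getD entries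
lemma getD_range_self (m0 : List Int) :
    m0 = (List.range m0.length).map (fun i => m0.getD i 0) := by
  apply List.ext_getElem
  · simp
  · intro j h1 h2
    simp [List.getD_eq_getElem?_getD, List.getElem?_eq_getElem h1]

-- B's fold over the remaining rows computes the per-column minimums of m0 and those rows
lemma foldl_zipmin_eq (rs : List (List Int)) :
    ∀ (m0 : List Int), (∀ r ∈ rs, m0.length ≤ r.length) →
    rs.foldl (fun m row => (m.zip row).map (fun p => if p.1 ≤ p.2 then p.1 else p.2)) m0
      = (List.range m0.length).map
          (fun i => (rs.map (fun r => r.getD i 0)).foldl min (m0.getD i 0)) := by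
  induction rs with
  | nil => intro m0 _; simpa using getD_range_self m0
  | cons r rs ih =>
    intro m0 h
    have hr : m0.length ≤ r.length := h r (by simp)
    have hlen : ((m0.zip r).map (fun p : Int × Int => if p.1 ≤ p.2 then p.1 else p.2)).length = m0.length := by
      simp [List.length_zip]; omega
    simp only [List.foldl_cons]
    rw [ih _ (by intro r' hr'; rw [hlen]; exact h r' (by simp [hr']))]
    rw [hlen]
    apply List.map_congr_left
    intro i hi
    have hi' : i < m0.length := List.mem_range.mp hi
    have hmin : ((m0.zip r).map (fun p : Int × Int => if p.1 ≤ p.2 then p.1 else p.2)).getD i 0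
        = min (m0.getD i 0) (r.getD i 0) := by
      have h1 : i < ((m0.zip r).map (fun p : Int × Int => if p.1 ≤ p.2 then p.1 else p.2)).length := by omega
      rw [List.getD_eq_getElem _ _ h1, List.getElem_map, List.getElem_zip,
          List.getD_eq_getElem _ _ hi', List.getD_eq_getElem _ _ (by omega : i < r.length)]
      exact (min_def _ _).symm
    rw [hmin]
    simp [min_comm]

-- ===== VERDICT (by name: the statement is the Claim_ definition above) =====
theorem max_in_min_elem_columns_matrix_without_col_spec : Claim_equal_max_in_min_elem_columns_matrix_without_col := by
  intro matrix _ hpre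
  obtain ⟨hne, hh, hall⟩ := hpre
  unfold Spec_max_in_min_elem_columns_matrix_without_col
  cases matrix with
  | nil => exact absurd rfl hne
  | cons r0 rs =>
    simp only [List.headI] at hh hall
    unfold max_in_min_elem_columns_matrix_without_col max_in_min_elem_columns_matrix_without_col_alt
    rw [PySem.List.slice_from_one]
    simp only [PySem.List.pyGetD_zero_cons, List.tail_cons]
    rw [foldl_zipmin_eq rs r0 (fun r hr => hall r (by simp [hr]))]
    congr 2
    have hres : ∀ i : Int,
        (PySem.List.pyRange 0 (((r0 :: rs).length : Int)) 1).foldl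
          (fun r j => r ++ [PySem.List.pyGetD (PySem.List.pyGetD (r0 :: rs) j []) i 0]) []
        = (r0 :: rs).map (fun row => PySem.List.pyGetD row i 0) := by
      intro i
      rw [PySem.List.foldl_pyRange_zero_pyGetD' (r0 :: rs) [] (fun r row => r ++ [PySem.List.pyGetD row i 0]) []]
      rw [PySem.List.foldl_append_singleton_eq_map]
      simp
    simp only [hres]
    rw [PySem.List.foldl_append_singleton_eq_map]
    simp only [List.nil_append]
    rw [PySem.List.pyRange_zero_nat, List.map_map]
    congr 2
    apply List.map_congr_left
    intro k _
    simp only [Function.comp_apply, PySem.List.pyGetD_natCast, List.map_cons]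
    rw [PySem.List.min?_id_cons]
    rfl
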